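-- pv_equiv track=rewrite | github.com/linkpellow/my-lead-engine | scrapegoat/app/enrichment/telnyx_gatekeep.py | is_junk_carrier
-- ===== SOURCE A (Python) =====
-- JUNK_CARRIERS = [
--     'Google Voice',
--     'TextNow',
--     'Burner',
--     'Twilio',
--     'Bandwidth',
--     'Vonage',
--     'RingCentral',
--     '8x8',
--     'Nextiva',
--     'Ooma',
--     'MagicJack',
--     'Grasshopper',
-- ]
--
-- def is_junk_carrier(carrier_name: str) -> bool:
--     """Check if carrier is known junk/VOIP provider"""
--     if not carrier_name:
--         return False
--
--     carrier_lower = carrier_name.lower()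
--     for junk in JUNK_CARRIERS:
--         if junk.lower() in carrier_lower:
--             return True
--
--     return False
-- ===== SOURCE B (Python) =====
-- JUNK_CARRIERS = [
--     'Google Voice',
--     'TextNow',
--     'Burner',
--     'Twilio',
--     'Bandwidth',
--     'Vonage',
--     'RingCentral',
--     '8x8',
--     'Nextiva',
--     'Ooma',
--     'MagicJack',
--     'Grasshopper',
-- ]
--
-- _JUNK = frozenset(name.lower() for name in JUNK_CARRIERS)
-- _LENGTHS = sorted({len(name) for name in _JUNK})
--
-- def is_junk_carrier(carrier_name: str) -> bool:
--     """Check if carrier is known junk/VOIP provider"""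
--     s = carrier_name.lower()
--     return any(s[i:i + n] in _JUNK
--                for n in _LENGTHS
--                for i in range(len(s) - n + 1))
-- ===== Notes on version B (the rewrite author's own statement) =====
-- stated objective: alternative
-- what changed: A loops pattern-major doing one substring containment search per junk name; B precomputes a frozenset of lowercased names plus their distinct lengths and slides windows of those lengths over the input, testing each window by hash-set membership instead of substring search.
import Mathlib
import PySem

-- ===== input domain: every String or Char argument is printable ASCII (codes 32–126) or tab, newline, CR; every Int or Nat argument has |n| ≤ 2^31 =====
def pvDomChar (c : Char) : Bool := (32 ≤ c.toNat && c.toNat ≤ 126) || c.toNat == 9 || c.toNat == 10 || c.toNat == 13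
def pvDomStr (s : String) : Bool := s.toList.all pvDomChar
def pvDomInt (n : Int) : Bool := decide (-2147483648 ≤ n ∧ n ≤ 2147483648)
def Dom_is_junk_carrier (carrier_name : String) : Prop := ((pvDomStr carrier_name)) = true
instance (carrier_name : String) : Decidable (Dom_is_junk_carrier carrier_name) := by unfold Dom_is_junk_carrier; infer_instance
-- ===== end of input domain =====

-- B trades A's per-pattern substring searches for sliding windows of the distinct
-- pattern lengths tested by hash-set membership; return value only, no side effects.

-- ===== PORT A =====
def JUNK_CARRIERS : List String :=
  ["Google Voice", "TextNow", "Burner", "Twilio", "Bandwidth", "Vonage",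
   "RingCentral", "8x8", "Nextiva", "Ooma", "MagicJack", "Grasshopper"]

def is_junk_carrier (carrier_name : String) : Bool :=
  if carrier_name.toList = [] then false
  else
    let carrier_lower := PySem.Str.lower carrier_name
    JUNK_CARRIERS.any (fun junk => PySem.Str.isIn (PySem.Str.lower junk) carrier_lower)

-- ===== PORT B =====
-- _JUNK = frozenset(name.lower() for name in JUNK_CARRIERS)
def JUNK_SET : PySem.Set (List Char) :=
  PySem.Set.ofList (JUNK_CARRIERS.map (fun name => PySem.Chars.lower name.toList))

-- _LENGTHS = sorted({len(name) for name in _JUNK})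
def LENGTHS : List Int :=
  PySem.List.sorted (PySem.Set.ofList (JUNK_SET.map (fun name => (name.length : Int)))) (fun x => x) false

def is_junk_carrier_alt (carrier_name : String) : Bool :=
  let s := PySem.Chars.lower carrier_name.toList
  LENGTHS.any (fun n =>
    (PySem.List.pyRange 0 ((s.length : Int) - n + 1) 1).any (fun i =>
      JUNK_SET.contains (PySem.List.slice s (some i) (some (i + n)))))

-- ===== PRECONDITION & SPEC =====
def Spec_is_junk_carrier (carrier_name : String) (out : Bool) : Prop := out = is_junk_carrier_alt carrier_name
instance (carrier_name : String) (out : Bool) : Decidable (Spec_is_junk_carrier carrier_name out) := by unfold Spec_is_junk_carrier; infer_instance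

-- ===== CLAIM (what is proved, stated in full; the proofs are below) =====
def Claim_equal_is_junk_carrier : Prop := ∀ (carrier_name : String), Dom_is_junk_carrier carrier_name → Spec_is_junk_carrier carrier_name (is_junk_carrier carrier_name)

-- ===== LEMMAS AND PROOFS =====

-- B returns true iff some (lowered) junk name occurs as a substring of the lowered input
lemma junk_facts : ∀ j ∈ JUNK_SET, (j.length : Int) ∈ LENGTHS ∧ j ≠ [] := by decide

lemma lengths_pos : ∀ n ∈ LENGTHS, (0:Int) < n := by decide

-- B returns true iff some (lowered) junk name occurs as a substring of the lowered input
lemma alt_true_iff (L : List Char) :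
    (LENGTHS.any (fun n =>
      (PySem.List.pyRange 0 ((L.length : Int) - n + 1) 1).any (fun i =>
        JUNK_SET.contains (PySem.List.slice L (some i) (some (i + n)))))) = true
    ↔ ∃ j ∈ JUNK_SET, PySem.Chars.isIn j L = true := by
  simp only [List.any_eq_true]
  constructor
  · rintro ⟨n, hn, i, hi, hc⟩
    have hnpos := lengths_pos n hn
    have hi' := (PySem.List.mem_pyRange_one).1 hi
    set j := PySem.List.slice L (some i) (some (i + n)) with hj
    refine ⟨j, (PySem.Set.contains_iff _ _).mp hc, ?_⟩
    apply (PySem.Chars.exists_prefix_drop_iff_isIn j L).1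
    refine ⟨i.toNat, ?_⟩
    rw [hj, PySem.List.slice_toNat L hi'.1 (by omega)]
    exact List.take_prefix _ _
  · rintro ⟨j, hjmem, hin⟩
    obtain ⟨a, hpre⟩ := (PySem.Chars.exists_prefix_drop_iff_isIn j L).2 hin
    have hjlen := junk_facts j hjmem
    have hlen : j.length ≤ L.length - a := by
      have := hpre.length_le
      simpa using this
    have hane : a + j.length ≤ L.length := by
      rcases Nat.lt_or_ge a L.length with h | h
      · omega
      · exfalso
        rw [List.drop_eq_nil_of_le h] at hpre
        exact hjlen.2 (List.prefix_nil.mp hpre)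
    refine ⟨(j.length : Int), hjlen.1, (a : Int), ?_, ?_⟩
    · exact (PySem.List.mem_pyRange_one).2 ⟨by positivity, by omega⟩
    · apply (PySem.Set.contains_iff _ _).mpr
      have : PySem.List.slice L (some (a : Int)) (some ((a : Int) + (j.length : Int))) = j := by
        rw [PySem.List.slice_natCast_add]
        exact (List.prefix_iff_eq_take.mp hpre).symm
      rw [this]; exact hjmem

-- A's pattern-major any, restated over the set of lowered names
lemma a_true_iff (L : List Char) :
    (JUNK_CARRIERS.any (fun junk => PySem.Chars.isIn (PySem.Chars.lower junk.toList) L)) = true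
    ↔ ∃ j ∈ JUNK_SET, PySem.Chars.isIn j L = true := by
  simp only [List.any_eq_true, JUNK_SET]
  constructor
  · rintro ⟨junk, hj, h⟩
    exact ⟨_, (PySem.Set.mem_ofList _ _).2 (List.mem_map_of_mem hj), h⟩
  · rintro ⟨j, hj, h⟩
    obtain ⟨junk, hjunk, hEq⟩ := List.mem_map.1 ((PySem.Set.mem_ofList _ _).1 hj)
    subst hEq
    exact ⟨junk, hjunk, h⟩

-- ===== VERDICT (by name: the statement is the Claim_ definition above) =====
theorem is_junk_carrier_spec : Claim_equal_is_junk_carrier := by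
  intro s _
  unfold Spec_is_junk_carrier is_junk_carrier is_junk_carrier_alt
  by_cases hnil : s.toList = []
  · simp only [hnil, if_true]
    decide
  · simp only [hnil, if_false]
    apply Bool.eq_iff_iff.mpr
    rw [alt_true_iff]
    have : ∀ junk : String, PySem.Str.isIn (PySem.Str.lower junk) (PySem.Str.lower s) =
        PySem.Chars.isIn (PySem.Chars.lower junk.toList) (PySem.Chars.lower s.toList) := by
      intro junk
      simp [PySem.Str.isIn, PySem.Str.lower]
    simp only [this]
    exact a_true_iff (PySem.Chars.lower s.toList)
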